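-- pv_equiv track=rewrite | github.com/TCDG/SimpleDiscordAIBot | bot.py | repget
-- ===== SOURCE A (Python) =====
-- def repget(msg):
--     endno = 0
--     endmsg = msg
--     for no in range(0,100):
--         if "[#"+str(no)+"]" in msg:
--             endno = no
--             endmsg = msg.replace("[#"+str(no)+"]","",1)
--     return endmsg,endno
-- ===== SOURCE B (Python) =====
-- def _hit(msg, i):
--     """Value of a canonical [#n] tag (n in 0..99, no leading zeros) starting at msg[i], else None."""
--     if not msg.startswith("[#", i):
--         return None
--     j = i + 2
--     while j < len(msg) and msg[j].isdigit():
--         j += 1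
--     d = j - (i + 2)
--     if (d == 1 or (d == 2 and msg[i + 2] != "0")) and j < len(msg) and msg[j] == "]":
--         return int(msg[i + 2:j])
--     return None
--
--
-- def repget(msg):
--     best = -1
--     for i in range(len(msg)):
--         v = _hit(msg, i)
--         if v is not None and v > best:
--             best = v
--     if best < 0:
--         return msg, 0
--     return msg.replace("[#" + str(best) + "]", "", 1), best
-- ===== Notes on version B (the rewrite author's own statement) =====
-- stated objective: alternative
-- what changed: Replaces the fixed 100-candidate scan (one full substring search of msg per candidate tag) by a single left-to-right tokenizing pass that parses each bracketed-number tag occurrence once, keeps the maximum canonical value in 0..99, and does one final replace.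
import Mathlib
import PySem

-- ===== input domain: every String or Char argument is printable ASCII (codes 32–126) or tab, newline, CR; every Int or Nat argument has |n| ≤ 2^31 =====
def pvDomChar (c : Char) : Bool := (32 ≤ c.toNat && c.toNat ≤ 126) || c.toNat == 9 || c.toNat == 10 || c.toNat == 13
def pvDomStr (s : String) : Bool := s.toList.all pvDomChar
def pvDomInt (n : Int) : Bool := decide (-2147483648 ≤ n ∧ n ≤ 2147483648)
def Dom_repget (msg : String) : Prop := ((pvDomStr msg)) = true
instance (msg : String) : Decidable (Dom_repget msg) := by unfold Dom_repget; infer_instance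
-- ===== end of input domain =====

-- B replaces A's fixed scan of 100 candidate tags (one substring search of msg each) by a single
-- tokenizing pass over msg that keeps the maximum canonical tag value; objective: alternative algorithm.


-- shared hand-ported primitive: Python's s.replace(old, "", 1) for NONEMPTY old, on code points;
-- exact there: Python removes the first occurrence of old (found leftmost), or leaves s unchanged.
def replaceOnce (s old : List Char) : List Char :=
  let i := PySem.Chars.find s old
  if i = -1 then s else s.take i.toNat ++ s.drop (i.toNat + old.length)

-- ===== PORT A =====
def repget (msg : String) : String × Int :=
  let s := msg.toList
  let st := (PySem.List.pyRange 0 100).foldl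
    (fun (st : Int × String) no =>
      if PySem.Chars.isIn ('[' :: '#' :: (PySem.Int.toChars no ++ [']'])) s then
        (no, String.ofList (replaceOnce s ('[' :: '#' :: (PySem.Int.toChars no ++ [']']))))
      else st)
    (0, msg)
  (st.2, st.1)

-- ===== PORT B =====
-- _hit(msg, i): value of a canonical [#n] tag starting at msg[i], else none.
-- msg.startswith("[#", i), msg[j], msg[i+2] and msg[i+2:j] all read msg from offset i;
-- they are ported exactly through the suffix rest = msg[i:] (rest[k] = msg[i+k]).
def hitValFrom (s : List Char) (i : Nat) : Option Int :=
  if PySem.Chars.startswith (s.drop i) ['[', '#'] then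
    let body := (s.drop i).drop 2
    let d := (body.takeWhile PySem.Chars.isdigit).length
    if (d = 1 ∨ (d = 2 ∧ PySem.List.pyGetD body 0 ' ' ≠ '0')) ∧
        d < body.length ∧ PySem.List.pyGetD body (d : Int) ' ' = ']' then
      some ((PySem.Int.ofChars? (body.take d)).getD 0)  -- int() of a pure digit string never raises
    else none
  else none

def repget_alt (msg : String) : String × Int :=
  let s := msg.toList
  let best := (List.range s.length).foldl
    (fun best i =>
      match hitValFrom s i with
      | some v => if v > best then v else best
      | none => best) (-1)
  if best < 0 then (msg, 0)
  else (String.ofList (replaceOnce s ('[' :: '#' :: (PySem.Int.toChars best ++ [']']))), best)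

-- ===== PRECONDITION & SPEC =====
def Spec_repget (msg : String) (out : String × Int) : Prop := out = repget_alt msg
instance (msg : String) (out : String × Int) : Decidable (Spec_repget msg out) := by unfold Spec_repget; infer_instance

-- ===== CLAIM (what is proved, stated in full; the proofs are below) =====
def Claim_equal_repget : Prop := ∀ (msg : String), Dom_repget msg → Spec_repget msg (repget msg)

-- ===== LEMMAS AND PROOFS =====

def tagL (v : Int) : List Char := '[' :: '#' :: (PySem.Int.toChars v ++ [']'])

-- proof-side view of _hit as a function of the suffix (hitValFrom s i = hitVal (s.drop i) by rfl)
def hitVal (rest : List Char) : Option Int :=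
  if PySem.Chars.startswith rest ['[', '#'] then
    let body := rest.drop 2
    let d := (body.takeWhile PySem.Chars.isdigit).length
    if (d = 1 ∨ (d = 2 ∧ PySem.List.pyGetD body 0 ' ' ≠ '0')) ∧
        d < body.length ∧ PySem.List.pyGetD body (d : Int) ' ' = ']' then
      some ((PySem.Int.ofChars? (body.take d)).getD 0)
    else none
  else none

theorem hitValFrom_eq (s : List Char) (i : Nat) : hitValFrom s i = hitVal (s.drop i) := rfl

def stepB (s : List Char) : Int → Nat → Int := fun best i =>
  match hitValFrom s i with
  | some v => if v > best then v else best
  | none => best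

def bestOf (s : List Char) : Int := (List.range s.length).foldl (stepB s) (-1)

theorem canonAll : ∀ n ∈ List.range 100,
    ((PySem.Int.toChars (n:Int)).all PySem.Chars.isdigit ∧
    ((PySem.Int.toChars (n:Int)).length = 1 ∨
      ((PySem.Int.toChars (n:Int)).length = 2 ∧ (PySem.Int.toChars (n:Int)).headD ' ' ≠ '0')) ∧
    PySem.Int.ofChars? (PySem.Int.toChars (n:Int)) = some (n:Int)) := by decide

theorem toChars_canon (v : Int) (h0 : 0 ≤ v) (h1 : v < 100) :
    (∀ c ∈ PySem.Int.toChars v, PySem.Chars.isdigit c = true) ∧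
    ((PySem.Int.toChars v).length = 1 ∨
      ((PySem.Int.toChars v).length = 2 ∧ (PySem.Int.toChars v).headD ' ' ≠ '0')) ∧
    PySem.Int.ofChars? (PySem.Int.toChars v) = some v := by
  have hv : v = ((v.toNat : Nat) : Int) := (Int.toNat_of_nonneg h0).symm
  have hmem : v.toNat ∈ List.range 100 := by
    rw [List.mem_range]; omega
  have := canonAll v.toNat hmem
  rw [← hv] at this
  exact ⟨List.all_eq_true.mp this.1, this.2.1, this.2.2⟩

theorem charEq_of_toNat {a b : Char} (h : a.toNat = b.toNat) : a = b :=
  Char.ext (UInt32.toNat_inj.mp h)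

theorem isdigit_bounds {c : Char} (h : PySem.Chars.isdigit c = true) :
    48 ≤ c.toNat ∧ c.toNat ≤ 57 := by
  simp only [PySem.Chars.isdigit, Bool.and_eq_true, decide_eq_true_eq] at h
  exact ⟨h.1, h.2⟩

theorem digitsAll1 : ∀ k ∈ List.range 10,
    PySem.Int.ofChars? [Char.ofNat (48 + k)] = some ((k : Nat) : Int) ∧
    PySem.Int.toChars ((k : Nat) : Int) = [Char.ofNat (48 + k)] := by decide

theorem digitsAll2 : ∀ k ∈ List.range 90,
    PySem.Int.ofChars? [Char.ofNat (49 + k/10), Char.ofNat (48 + k%10)] = some ((10 + k : Nat) : Int) ∧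
    PySem.Int.toChars ((10 + k : Nat) : Int) = [Char.ofNat (49 + k/10), Char.ofNat (48 + k%10)] := by decide

theorem digits_roundtrip (ds : List Char) (hall : ∀ c ∈ ds, PySem.Chars.isdigit c = true)
    (hlen : ds.length = 1 ∨ (ds.length = 2 ∧ ds.headD ' ' ≠ '0')) :
    ∃ v, 0 ≤ v ∧ v < 100 ∧ PySem.Int.ofChars? ds = some v ∧ PySem.Int.toChars v = ds := by
  rcases hlen with h1 | ⟨h2, hnz⟩
  · obtain ⟨a, rfl⟩ : ∃ a, ds = [a] := by
      rcases ds with _ | ⟨a, _ | ⟨b, t⟩⟩ <;> simp_all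
    have hb := isdigit_bounds (hall a List.mem_cons_self)
    have hk : a.toNat - 48 ∈ List.range 10 := by rw [List.mem_range]; omega
    obtain ⟨hof, hto⟩ := digitsAll1 _ hk
    have ha : Char.ofNat (48 + (a.toNat - 48)) = a := by
      have : 48 + (a.toNat - 48) = a.toNat := by omega
      rw [this, Char.ofNat_toNat]
    rw [ha] at hof hto
    exact ⟨_, by positivity, by exact_mod_cast (show (a.toNat - 48 : Nat) < 100 by omega), hof, hto⟩
  · obtain ⟨a, b, rfl⟩ : ∃ a b, ds = [a, b] := by
      rcases ds with _ | ⟨a, _ | ⟨b, _ | t⟩⟩ <;> simp_all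
    have hba := isdigit_bounds (hall a List.mem_cons_self)
    have hbb := isdigit_bounds (hall b (by simp))
    have hanz : a.toNat ≠ 48 := by
      intro hc
      exact hnz (by simpa using charEq_of_toNat (b := '0') (by simpa using hc))
    set k : Nat := (a.toNat - 49) * 10 + (b.toNat - 48) with hkdef
    have hk : k ∈ List.range 90 := by rw [List.mem_range]; omega
    obtain ⟨hof, hto⟩ := digitsAll2 _ hk
    have hdiv : 49 + k / 10 = a.toNat := by omega
    have hmod : 48 + k % 10 = b.toNat := by omega
    rw [hdiv, hmod, Char.ofNat_toNat, Char.ofNat_toNat] at hof hto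
    exact ⟨_, by positivity, by exact_mod_cast (show (10 + k : Nat) < 100 by omega), hof, hto⟩

theorem hit_complete (t : List Char) (v : Int) (h0 : 0 ≤ v) (h1 : v < 100)
    (hp : tagL v <+: t) : hitVal t = some v := by
  obtain ⟨hall, hlen, hof⟩ := toChars_canon v h0 h1
  obtain ⟨u, rfl⟩ := hp
  have hshape : tagL v ++ u = '[' :: '#' :: (PySem.Int.toChars v ++ (']' :: u)) := by
    simp [tagL]
  rw [hshape]
  have hsw : PySem.Chars.startswith ('[' :: '#' :: (PySem.Int.toChars v ++ (']' :: u))) ['[', '#'] = true := by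
    rw [PySem.Chars.startswith_iff]
    exact ⟨_, rfl⟩
  have htw : (PySem.Int.toChars v ++ (']' :: u)).takeWhile PySem.Chars.isdigit = PySem.Int.toChars v := by
    rw [List.takeWhile_append, List.takeWhile_eq_self_iff.mpr hall]
    rw [if_pos rfl, List.takeWhile_cons_of_neg (by decide)]
    simp
  have hdlt : (PySem.Int.toChars v).length < (PySem.Int.toChars v ++ (']' :: u)).length := by
    simp [List.length_append]
  have hget : PySem.List.pyGetD (PySem.Int.toChars v ++ (']' :: u)) ((PySem.Int.toChars v).length : Int) ' ' = ']' := by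
    rw [PySem.List.pyGetD_natCast, List.getD_eq_getElem _ _ hdlt,
      List.getElem_append_right (le_refl _)]
    simp
  have hhead : (PySem.Int.toChars v).length = 2 →
      PySem.List.pyGetD (PySem.Int.toChars v ++ (']' :: u)) 0 ' ' ≠ '0' := by
    intro h2
    rcases hlen with h | ⟨_, hnz⟩
    · omega
    · obtain ⟨x, y, hxy⟩ : ∃ x y, PySem.Int.toChars v = [x, y] := by
        rcases hxx : PySem.Int.toChars v with _ | ⟨x, _ | ⟨y, _ | t⟩⟩ <;> simp_all
      rw [hxy]
      rw [hxy] at hnz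
      simpa [PySem.List.pyGetD_of_nonneg _ ' ' (le_refl (0:Int)), List.getD] using hnz
  simp only [hitVal, List.drop_succ_cons, List.drop_zero, htw]
  rw [if_pos hsw]
  rw [if_pos ⟨by tauto, hdlt, hget⟩]
  rw [show (PySem.Int.toChars v ++ (']' :: u)).take (PySem.Int.toChars v).length
      = PySem.Int.toChars v from List.take_left, hof]
  rfl

theorem hit_sound (t : List Char) (v : Int) (h : hitVal t = some v) :
    0 ≤ v ∧ v < 100 ∧ tagL v <+: t := by
  by_cases hsw : PySem.Chars.startswith t ['[', '#'] = true
  case neg => simp [hitVal, hsw] at h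
  obtain ⟨u, rfl⟩ : ∃ u, t = '[' :: '#' :: u := by
    rcases (PySem.Chars.startswith_iff _ _).mp hsw with ⟨w, hw⟩
    exact ⟨w, hw.symm⟩
  simp only [hitVal, List.drop_succ_cons, List.drop_zero] at h
  rw [if_pos hsw] at h
  set ds := u.takeWhile PySem.Chars.isdigit with hds
  by_cases hc : ((ds.length = 1 ∨ (ds.length = 2 ∧ PySem.List.pyGetD u 0 ' ' ≠ '0')) ∧
      ds.length < u.length ∧ PySem.List.pyGetD u (ds.length : Int) ' ' = ']')
  case neg => rw [if_neg hc] at h; cases h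
  rw [if_pos hc] at h
  obtain ⟨hc1, hclt, hcget⟩ := hc
  have hall : ∀ c ∈ ds, PySem.Chars.isdigit c = true := fun c hcm => List.mem_takeWhile_imp hcm
  have htake : u.take ds.length = ds := (List.prefix_iff_eq_take.mp (List.takeWhile_prefix _)).symm
  have hu : u = ds ++ u.drop ds.length := by
    have h' := (List.take_append_drop ds.length u).symm
    rwa [htake] at h'
  have hgetel : u[ds.length]'hclt = ']' := by
    rw [PySem.List.pyGetD_natCast, List.getD_eq_getElem _ _ hclt] at hcget
    exact hcget
  have hdrop : u.drop ds.length = ']' :: u.drop (ds.length + 1) := by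
    rw [List.drop_eq_getElem_cons hclt, hgetel]
  have hhead : ds.length = 2 → ds.headD ' ' ≠ '0' := by
    intro h2 hz
    obtain ⟨x, y, hxy⟩ : ∃ x y, ds = [x, y] := List.length_eq_two.mp h2
    have hux : u = x :: y :: u.drop ds.length := by
      rw [hu, hxy]; rfl
    rcases hc1 with h1 | ⟨_, hnz⟩
    · omega
    · apply hnz
      rw [hux, PySem.List.pyGetD_of_nonneg _ ' ' (le_refl (0:Int))]
      rw [hxy] at hz
      simpa [List.getD] using hz
  have hlen : ds.length = 1 ∨ (ds.length = 2 ∧ ds.headD ' ' ≠ '0') := by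
    rcases hc1 with h1 | ⟨h2, _⟩
    · exact Or.inl h1
    · exact Or.inr ⟨h2, hhead h2⟩
  obtain ⟨v', hv0, hv1, hof, hto⟩ := digits_roundtrip ds hall hlen
  rw [htake, hof] at h
  obtain rfl : v' = v := by injection h
  refine ⟨hv0, hv1, ?_⟩
  refine ⟨u.drop (ds.length + 1), ?_⟩
  show ('[' :: '#' :: (PySem.Int.toChars v' ++ [']'])) ++ u.drop (ds.length + 1) = '[' :: '#' :: u
  rw [hto]
  simp only [List.cons_append, List.append_assoc, List.nil_append]
  rw [← hdrop, ← hu]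

theorem stepB_ge (s : List Char) (b : Int) (i : Nat) : b ≤ stepB s b i := by
  unfold stepB
  rcases hitValFrom s i with _ | v
  · exact le_refl b
  · simp only
    split_ifs with h
    · exact le_of_lt h
    · exact le_refl b

theorem scanF_ge (s : List Char) : ∀ (l : List Nat) (b : Int), b ≤ l.foldl (stepB s) b := by
  intro l
  induction l with
  | nil => intro b; exact le_refl b
  | cons i l ih =>
      intro b
      rw [List.foldl_cons]
      exact le_trans (stepB_ge s b i) (ih _)

theorem scanF_ub (s : List Char) : ∀ (l : List Nat) (b : Int) (i : Nat) (v : Int),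
    i ∈ l → hitValFrom s i = some v → v ≤ l.foldl (stepB s) b := by
  intro l
  induction l with
  | nil => intro b i v hi; simp at hi
  | cons i0 l ih =>
      intro b i v hi hv
      rw [List.foldl_cons]
      rcases List.mem_cons.mp hi with rfl | hi'
      · refine le_trans ?_ (scanF_ge s l _)
        unfold stepB
        rw [hv]
        simp only
        split_ifs with h
        · exact le_refl v
        · omega
      · exact ih _ i v hi' hv

theorem scanF_mem (s : List Char) : ∀ (l : List Nat) (b : Int),
    l.foldl (stepB s) b = b ∨ ∃ i ∈ l, hitValFrom s i = some (l.foldl (stepB s) b) := by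
  intro l
  induction l with
  | nil => intro b; exact Or.inl rfl
  | cons i0 l ih =>
      intro b
      rw [List.foldl_cons]
      rcases hh : hitValFrom s i0 with _ | v
      · have hstep : stepB s b i0 = b := by unfold stepB; rw [hh]
        rw [hstep]
        rcases ih b with h | ⟨i, hi, hv⟩
        · exact Or.inl h
        · exact Or.inr ⟨i, List.mem_cons_of_mem i0 hi, hv⟩
      · have hstep : stepB s b i0 = if v > b then v else b := by unfold stepB; rw [hh]
        rw [hstep]
        split_ifs with hgt
        · rcases ih v with h | ⟨i, hi, hv⟩
          · exact Or.inr ⟨i0, List.mem_cons_self, by rw [h]; exact hh⟩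
          · exact Or.inr ⟨i, List.mem_cons_of_mem i0 hi, hv⟩
        · rcases ih b with h | ⟨i, hi, hv⟩
          · exact Or.inl h
          · exact Or.inr ⟨i, List.mem_cons_of_mem i0 hi, hv⟩

theorem hitVal_nil_eq_none : hitVal [] = none := by
  simp [hitVal, PySem.Chars.startswith]

theorem bestOf_ub (s t : List Char) (v : Int) (ht : t <:+ s) (hv : hitVal t = some v) :
    v ≤ bestOf s := by
  obtain ⟨pre, hpre⟩ := ht
  have hne : t ≠ [] := by
    intro h
    rw [h, hitVal_nil_eq_none] at hv
    cases hv
  have htlen : 0 < t.length := List.length_pos_iff.mpr hne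
  have hi : pre.length ∈ List.range s.length := by
    rw [List.mem_range, ← hpre, List.length_append]
    omega
  have hdrop : s.drop pre.length = t := by
    rw [← hpre]
    exact List.drop_left
  have hvf : hitValFrom s pre.length = some v := by
    rw [hitValFrom_eq, hdrop]
    exact hv
  exact scanF_ub s _ _ _ _ hi hvf

theorem bestOf_mem (s : List Char) :
    bestOf s = -1 ∨ ∃ t, t <:+ s ∧ hitVal t = some (bestOf s) := by
  rcases scanF_mem s (List.range s.length) (-1) with h | ⟨i, _, hv⟩
  · exact Or.inl h
  · rw [hitValFrom_eq] at hv
    exact Or.inr ⟨s.drop i, List.drop_suffix i s, hv⟩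

theorem find?_max_desc (p : Int → Bool) : ∀ (l : List Int), l.Pairwise (· > ·) →
    ∀ (m : Int), l.find? p = some m → ∀ x ∈ l, p x = true → x ≤ m := by
  intro l
  induction l with
  | nil => intro _ m hm; simp at hm
  | cons a l ih =>
      intro hp m hm x hx hpx
      rw [List.pairwise_cons] at hp
      by_cases hpa : p a = true
      · rw [List.find?_cons_of_pos hpa] at hm
        have ham : a = m := by injection hm
        subst ham
        rcases hx with _ | hx
        · exact le_refl a
        · exact le_of_lt (hp.1 x (by assumption))
      · rw [List.find?_cons_of_neg (by simpa using hpa)] at hm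
        rcases hx with _ | hx
        · exact absurd hpx hpa
        · exact ih hp.2 m hm x (by assumption) hpx

theorem foldA_eq (s : List Char) (l : List Int) : ∀ (st : Int × String),
    l.foldl
      (fun (st : Int × String) no =>
        if PySem.Chars.isIn ('[' :: '#' :: (PySem.Int.toChars no ++ [']'])) s then
          (no, String.ofList (replaceOnce s ('[' :: '#' :: (PySem.Int.toChars no ++ [']']))))
        else st) st
    = match l.reverse.find? (fun no => PySem.Chars.isIn (tagL no) s) with
      | some m => (m, String.ofList (replaceOnce s (tagL m)))
      | none => st := by
  induction l with
  | nil => intro st; rfl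
  | cons a l ih =>
      intro st
      rw [List.foldl_cons, List.reverse_cons, List.find?_append, ih]
      rcases h : l.reverse.find? (fun no => PySem.Chars.isIn (tagL no) s) with _ | m
      · simp only [Option.none_or]
        by_cases hpa : PySem.Chars.isIn (tagL a) s = true
        · have hf : List.find? (fun no => PySem.Chars.isIn (tagL no) s) [a] = some a :=
            List.find?_cons_of_pos hpa
          rw [hf, if_pos (show PySem.Chars.isIn ('[' :: '#' :: (PySem.Int.toChars a ++ [']'])) s = true from hpa)]
          rfl
        · have hf : List.find? (fun no => PySem.Chars.isIn (tagL no) s) [a] = none :=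
            List.find?_cons_of_neg (by simpa using hpa)
          rw [hf, if_neg (show ¬ PySem.Chars.isIn ('[' :: '#' :: (PySem.Int.toChars a ++ [']'])) s = true from hpa)]
      · simp only [Option.some_or]

theorem pyRange100_pairwise : (PySem.List.pyRange 0 100).reverse.Pairwise (· > ·) := by
  rw [List.pairwise_reverse]
  have : (100 : Int) = ((100 : Nat) : Int) := by norm_num
  rw [this, PySem.List.pyRange_zero_natCast]
  rw [List.pairwise_map]
  exact List.pairwise_lt_range.imp (by intro a b h; exact_mod_cast h)

theorem repget_eq_alt (msg : String) : repget msg = repget_alt msg := by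
  have halt : repget_alt msg = if bestOf msg.toList < 0 then (msg, 0)
      else (String.ofList (replaceOnce msg.toList (tagL (bestOf msg.toList))), bestOf msg.toList) := rfl
  rw [halt]
  simp only [repget]
  rw [foldA_eq msg.toList (PySem.List.pyRange 0 100) (0, msg)]
  rcases hfind : (PySem.List.pyRange 0 100).reverse.find?
      (fun no => PySem.Chars.isIn (tagL no) msg.toList) with _ | m
  · have hnone := List.find?_eq_none.mp hfind
    have hrneg : bestOf msg.toList < 0 := by
      rcases bestOf_mem msg.toList with h | ⟨t, ht, hv⟩
      · omega
      · obtain ⟨h0, h1, hpre⟩ := hit_sound t _ hv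
        exfalso
        refine hnone (bestOf msg.toList) ?_ ?_
        · rw [List.mem_reverse, PySem.List.mem_pyRange_one]; exact ⟨h0, h1⟩
        · show PySem.Chars.isIn (tagL (bestOf msg.toList)) msg.toList = true
          rw [PySem.Chars.isIn_iff_infix]
          exact List.infix_iff_prefix_suffix.mpr ⟨t, hpre, ht⟩
    rw [if_pos hrneg]
  · have hpm : PySem.Chars.isIn (tagL m) msg.toList = true := by
      have := List.find?_some hfind
      simpa using this
    have hmmem : m ∈ PySem.List.pyRange 0 100 := List.mem_reverse.mp (List.mem_of_find?_eq_some hfind)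
    have hm0 : 0 ≤ m ∧ m < 100 := PySem.List.mem_pyRange_one.mp hmmem
    obtain ⟨t, htp, hts⟩ := List.infix_iff_prefix_suffix.mp ((PySem.Chars.isIn_iff_infix _ _).mp hpm)
    have hmr : m ≤ bestOf msg.toList :=
      bestOf_ub msg.toList t m hts (hit_complete t m hm0.1 hm0.2 htp)
    have hrm : bestOf msg.toList = m := by
      rcases bestOf_mem msg.toList with h | ⟨t2, ht2, hv2⟩
      · omega
      · obtain ⟨h0, h1, hpre⟩ := hit_sound t2 _ hv2
        have hpr : PySem.Chars.isIn (tagL (bestOf msg.toList)) msg.toList = true := by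
          rw [PySem.Chars.isIn_iff_infix]
          exact List.infix_iff_prefix_suffix.mpr ⟨t2, hpre, ht2⟩
        have hle := find?_max_desc _ _ pyRange100_pairwise m hfind (bestOf msg.toList)
          (by rw [List.mem_reverse, PySem.List.mem_pyRange_one]; exact ⟨h0, h1⟩) hpr
        omega
    rw [hrm, if_neg (by omega : ¬ (m : Int) < 0)]

-- ===== VERDICT (by name: the statement is the Claim_ definition above) =====
theorem repget_spec : Claim_equal_repget := by
  unfold Claim_equal_repget Spec_repget
  intro msg _
  exact repget_eq_alt msg
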